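-- pv_equiv track=rewrite | github.com/mawie97/RL-2D-Navigation | runner_hybrid.py | embed_block
-- ===== SOURCE A (Python) =====
-- from typing import List, Tuple, Optional
--
-- Coord = Tuple[int, int]
--
-- def embed_block(
--     big_H: int,
--     big_W: int,
--     block: List[List[bool]],
--     offset: Coord,
-- ) -> List[List[bool]]:
--     Hs, Ws = len(block), len(block[0])
--     br0, bc0 = offset
--     assert br0 + Hs <= big_H and bc0 + Ws <= big_W, "offset out of range"
--
--     grid = [[True for _ in range(big_W)] for _ in range(big_H)]
--     for r in range(Hs):
--         for c in range(Ws):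
--             grid[br0 + r][bc0 + c] = block[r][c]
--     return grid
-- ===== SOURCE B (Python) =====
-- from typing import List, Tuple
--
-- Coord = Tuple[int, int]
--
-- def embed_block(
--     big_H: int,
--     big_W: int,
--     block: List[List[bool]],
--     offset: Coord,
-- ) -> List[List[bool]]:
--     Hs, Ws = len(block), len(block[0])
--     br0, bc0 = offset
--     assert 0 <= br0 and 0 <= bc0 and br0 + Hs <= big_H and bc0 + Ws <= big_W, "offset out of range"
--
--     grid = []
--     for r in range(big_H):
--         if br0 <= r < br0 + Hs:
--             row = [True] * bc0 \
--                 + [block[r - br0][c] for c in range(Ws)] \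
--                 + [True] * (big_W - bc0 - Ws)
--         else:
--             row = [True] * big_W
--         grid.append(row)
--     return grid
-- ===== Notes on version B (the rewrite author's own statement) =====
-- stated objective: alternative
-- what changed: B builds each output row directly in one pass by concatenating True borders around the block slice (with an explicit non-negativity bound in the assert), instead of allocating an all-True grid and overwriting cells in a second nested pass.
-- outside the precondition, e.g. on embed_block(2, 2, [[False]], (-1, 0)): A returns [[True, True], [False, True]], B raises AssertionError
import Mathlib
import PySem

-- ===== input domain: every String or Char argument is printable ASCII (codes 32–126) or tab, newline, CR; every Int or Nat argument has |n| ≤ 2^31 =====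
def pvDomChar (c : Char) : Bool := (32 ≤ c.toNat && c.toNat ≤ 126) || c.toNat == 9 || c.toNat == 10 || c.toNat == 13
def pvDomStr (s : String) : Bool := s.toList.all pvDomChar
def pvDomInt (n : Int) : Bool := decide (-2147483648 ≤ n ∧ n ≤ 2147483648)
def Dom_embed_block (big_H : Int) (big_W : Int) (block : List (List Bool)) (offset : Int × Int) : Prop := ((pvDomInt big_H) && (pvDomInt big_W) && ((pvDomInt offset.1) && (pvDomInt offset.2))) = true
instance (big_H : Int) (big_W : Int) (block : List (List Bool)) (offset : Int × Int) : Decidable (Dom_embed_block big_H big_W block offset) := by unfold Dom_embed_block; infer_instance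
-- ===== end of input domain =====

-- B builds each row in one pass by concatenating True borders around the block slice, instead of
-- filling an all-True grid and overwriting cells in a second nested pass (objective: alternative).

-- ===== PORT A =====
def embed_block (big_H : Int) (big_W : Int) (block : List (List Bool)) (offset : Int × Int) : List (List Bool) :=
  let Hs : Int := PySem.List.len block
  let Ws : Int := PySem.List.len (PySem.List.pyGetD block 0 [])
  let br0 : Int := offset.1
  let bc0 : Int := offset.2
  if br0 + Hs ≤ big_H ∧ bc0 + Ws ≤ big_W then    -- assert; else-branch = AssertionError (outside Pre_)
    let grid := (PySem.List.pyRange 0 big_H 1).map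
      (fun _ => (PySem.List.pyRange 0 big_W 1).map (fun _ => true))
    (PySem.List.pyRange 0 Hs 1).foldl (fun g r =>
      (PySem.List.pyRange 0 Ws 1).foldl (fun g c =>
        PySem.List.pySetD g (br0 + r)
          (PySem.List.pySetD (PySem.List.pyGetD g (br0 + r) []) (bc0 + c)
            (PySem.List.pyGetD (PySem.List.pyGetD block r []) c true))) g) grid
  else []

-- ===== PORT B =====
def embed_block_alt (big_H : Int) (big_W : Int) (block : List (List Bool)) (offset : Int × Int) : List (List Bool) :=
  let Hs : Int := PySem.List.len block
  let Ws : Int := PySem.List.len (PySem.List.pyGetD block 0 [])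
  let br0 : Int := offset.1
  let bc0 : Int := offset.2
  if 0 ≤ br0 ∧ 0 ≤ bc0 ∧ br0 + Hs ≤ big_H ∧ bc0 + Ws ≤ big_W then    -- assert; else = AssertionError
    (PySem.List.pyRange 0 big_H 1).map (fun r =>
      if br0 ≤ r ∧ r < br0 + Hs then
        List.replicate bc0.toNat true
          ++ (PySem.List.pyRange 0 Ws 1).map
              (fun c => PySem.List.pyGetD (PySem.List.pyGetD block (r - br0) []) c true)
          ++ List.replicate (big_W - bc0 - Ws).toNat true
      else List.replicate big_W.toNat true)
  else []

-- ===== PRECONDITION & SPEC =====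
-- Pre_ excludes inputs where A raises (empty block → IndexError, a row shorter than block[0] →
-- IndexError, assert failure) and negative offsets: there A's negative-index wraparound slips past
-- its assert and returns an accidental placement, while B's natural bounds assert raises.
def Pre_embed_block (big_H : Int) (big_W : Int) (block : List (List Bool)) (offset : Int × Int) : Prop :=
  block ≠ [] ∧
  (∀ row ∈ block, (block.getD 0 []).length ≤ row.length) ∧
  0 ≤ offset.1 ∧ 0 ≤ offset.2 ∧
  offset.1 + block.length ≤ big_H ∧ offset.2 + (block.getD 0 []).length ≤ big_W
instance (big_H : Int) (big_W : Int) (block : List (List Bool)) (offset : Int × Int) : Decidable (Pre_embed_block big_H big_W block offset) := by unfold Pre_embed_block; infer_instance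

def pvWitness_embed_block : Int × Int × List (List Bool) × (Int × Int) := (2, 2, [[false]], (0, 1))

def Spec_embed_block (big_H : Int) (big_W : Int) (block : List (List Bool)) (offset : Int × Int) (out : List (List Bool)) : Prop := out = embed_block_alt big_H big_W block offset
instance (big_H : Int) (big_W : Int) (block : List (List Bool)) (offset : Int × Int) (out : List (List Bool)) : Decidable (Spec_embed_block big_H big_W block offset out) := by unfold Spec_embed_block; infer_instance

-- ===== CLAIM (what is proved, stated in full; the proofs are below) =====
def Claim_equal_embed_block : Prop := ∀ (big_H : Int) (big_W : Int) (block : List (List Bool)) (offset : Int × Int), Dom_embed_block big_H big_W block offset → Pre_embed_block big_H big_W block offset → Spec_embed_block big_H big_W block offset (embed_block big_H big_W block offset)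

-- ===== LEMMAS AND PROOFS =====

-- reading back the row just written
theorem pv_getD_set_self {α : Type} (g : List α) (i : Nat) (x : α) (d : α) (hi : i < g.length) :
    (g.set i x).getD i d = x := by
  rw [List.getD_eq_getElem _ _ (by simpa using hi), List.getElem_set_self]

theorem pv_set_getD_self {α : Type} (g : List α) (i : Nat) (d : α) (hi : i < g.length) :
    g.set i (g.getD i d) = g := by
  rw [List.getD_eq_getElem _ _ hi, List.set_getElem_self]

-- inner loop: all writes hit row i, so it is one in-place row update
theorem pv_inner_fold_set (ws : Nat) (i : Nat) (b : Nat) (v : Nat → Bool)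
    (g : List (List Bool)) (hi : i < g.length) :
    (List.range ws).foldl (fun g c => g.set i ((g.getD i []).set (b + c) (v c))) g
      = g.set i ((List.range ws).foldl (fun ρ c => ρ.set (b + c) (v c)) (g.getD i [])) := by
  induction ws with
  | zero => simp only [List.range_zero, List.foldl_nil]; rw [pv_set_getD_self g i [] hi]
  | succ n ih =>
      rw [List.range_succ, List.foldl_append, List.foldl_append, ih]
      simp only [List.foldl_cons, List.foldl_nil]
      rw [pv_getD_set_self g i _ [] hi, List.set_set]

-- out-of-range writes are no-ops, so the inner-loop lemma needs no bound
theorem pv_foldl_set_oob {β : Type} (l : List β) (g : List (List Bool)) (i : Nat)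
    (v : List (List Bool) → β → Bool) (idx : β → Nat) (hi : g.length ≤ i) :
    l.foldl (fun g c => g.set i ((g.getD i []).set (idx c) (v g c))) g = g := by
  induction l generalizing g with
  | nil => rfl
  | cons x xs ih =>
      simp only [List.foldl_cons]
      rw [List.set_eq_of_length_le hi, ih g hi]

theorem pv_inner_fold_set' (ws : Nat) (i : Nat) (b : Nat) (v : Nat → Bool)
    (g : List (List Bool)) :
    (List.range ws).foldl (fun g c => g.set i ((g.getD i []).set (b + c) (v c))) g
      = g.set i ((List.range ws).foldl (fun ρ c => ρ.set (b + c) (v c)) (g.getD i [])) := by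
  by_cases hi : i < g.length
  · exact pv_inner_fold_set ws i b v g hi
  · rw [Nat.not_lt] at hi
    rw [pv_foldl_set_oob _ g i _ _ hi, List.set_eq_of_length_le hi]

-- row update written as border concatenation
theorem pv_row_fold (ws : Nat) (b : Nat) (v : Nat → Bool) (ρ : List Bool)
    (h : b + ws ≤ ρ.length) :
    (List.range ws).foldl (fun ρ c => ρ.set (b + c) (v c)) ρ
      = ρ.take b ++ (List.range ws).map v ++ ρ.drop (b + ws) := by
  induction ws with
  | zero => simp
  | succ n ih =>
      rw [List.range_succ, List.foldl_append, ih (by omega)]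
      simp only [List.foldl_cons, List.foldl_nil]
      have hpre : (ρ.take b ++ (List.range n).map v).length = b + n := by
        simp; omega
      rw [List.set_append, if_neg (by omega), hpre, Nat.sub_self,
        List.drop_eq_getElem_cons (by omega : b + n < ρ.length)]
      simp only [List.set_cons_zero, List.map_append, List.map_cons, List.map_nil]
      simp only [List.append_assoc, List.cons_append, List.nil_append]
      rw [show b + (n + 1) = b + n + 1 by omega]

-- outer fold: hs disjoint row writes are one mapIdx
theorem pv_outer_fold (hs a : Nat) (F : Nat → List Bool → List Bool)
    (g : List (List Bool)) (h : a + hs ≤ g.length) :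
    (List.range hs).foldl (fun g r => g.set (a + r) (F r (g.getD (a + r) []))) g
      = g.mapIdx (fun u row => if a ≤ u ∧ u < a + hs then F (u - a) row else row) := by
  induction hs with
  | zero =>
      apply List.ext_getElem
      · simp
      · intro j h1 h2
        simp only [List.range_zero, List.foldl_nil, List.getElem_mapIdx]
        rw [if_neg (by omega)]
  | succ n ih =>
      rw [List.range_succ, List.foldl_append, ih (by omega)]
      simp only [List.foldl_cons, List.foldl_nil]
      have hlen : (g.mapIdx fun u row => if a ≤ u ∧ u < a + n then F (u - a) row else row).length = g.length := by simp
      have hlt : a + n < g.length := by omega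
      have hget : (g.mapIdx fun u row => if a ≤ u ∧ u < a + n then F (u - a) row else row).getD (a + n) [] = g[a + n] := by
        rw [List.getD_eq_getElem _ _ (by omega)]
        simp only [List.getElem_mapIdx]
        rw [if_neg (by omega)]
      rw [hget]
      apply List.ext_getElem
      · simp
      · intro j h1 h2
        simp only [List.getElem_set, List.getElem_mapIdx]
        by_cases hj : a + n = j
        · subst hj; rw [if_pos rfl, if_pos (by omega)]; congr 1; omega
        · rw [if_neg hj]
          by_cases hc : a ≤ j ∧ j < a + n
          · rw [if_pos hc, if_pos (by omega)]
          · rw [if_neg hc, if_neg (by omega)]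

-- mapIdx over a replicate is a map over the index range
theorem pv_mapIdx_replicate {α : Type} (H : Nat) (x : α) (f : Nat → α → α) :
    (List.replicate H x).mapIdx f = (List.range H).map (fun u => f u x) := by
  apply List.ext_getElem
  · simp
  · intro j h1 h2
    simp [List.getElem_mapIdx]

-- ===== VERDICT (by name: the statement is the Claim_ definition above) =====
theorem embed_block_spec : Claim_equal_embed_block := by
  intro big_H big_W block offset hdom hpre
  obtain ⟨o1, o2⟩ := offset
  obtain ⟨hne, hrows, hb0, hc0, hH, hW⟩ := hpre
  simp only at hb0 hc0 hH hW
  obtain ⟨A, rfl⟩ : ∃ n : Nat, o1 = (n : Int) := ⟨o1.toNat, by omega⟩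
  obtain ⟨B, rfl⟩ : ∃ n : Nat, o2 = (n : Int) := ⟨o2.toNat, by omega⟩
  obtain ⟨H, rfl⟩ : ∃ n : Nat, big_H = (n : Int) := ⟨big_H.toNat, by omega⟩
  obtain ⟨W, rfl⟩ : ∃ n : Nat, big_W = (n : Int) := ⟨big_W.toNat, by omega⟩
  have hHb : A + block.length ≤ H := by omega
  have hWb : B + (block.getD 0 []).length ≤ W := by omega
  show embed_block _ _ block (_, _) = embed_block_alt _ _ block (_, _)
  simp only [embed_block, embed_block_alt, PySem.List.len_eq, PySem.List.pyGetD_zero]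
  rw [if_pos (by constructor <;> omega), if_pos (by refine ⟨by omega, by omega, by omega, by omega⟩)]
  -- both sides over List.range, Nat indices
  simp only [PySem.List.pyRange_one, Int.sub_zero, Int.toNat_natCast,
    zero_add, List.foldl_map, List.map_map, Function.comp_def]
  simp only [List.map_const', List.length_range]
  simp only [← Int.natCast_add, PySem.List.pySetD_natCast, PySem.List.pyGetD_natCast]
  simp only [pv_inner_fold_set']
  rw [pv_outer_fold block.length A
        (fun r ρ => (List.range (block.getD 0 []).length).foldl
          (fun ρ c => ρ.set (B + c) ((block.getD r []).getD c true)) ρ)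
        (List.replicate H (List.replicate W true)) (by simp [hHb]),
      pv_mapIdx_replicate]
  apply List.map_congr_left
  intro u hu
  rw [List.mem_range] at hu
  by_cases hc : A ≤ u ∧ u < A + block.length
  · rw [if_pos hc, if_pos (by push_cast; omega)]
    rw [pv_row_fold _ _ _ _ (by rw [List.length_replicate]; exact hWb)]
    have h1 : ((u : Int) - (A : Int)) = ((u - A : Nat) : Int) := by omega
    have h2 : ((W : Int) - (B : Int) - ((block.getD 0 []).length : Int)).toNat
        = W - (B + (block.getD 0 []).length) := by omega
    rw [h1, h2]
    simp only [PySem.List.pyGetD_natCast,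
      List.take_replicate, List.drop_replicate]
    rw [min_comm, min_eq_right (by omega : B ≤ W)]
  · rw [if_neg hc, if_neg (by push_cast; omega)]
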